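-- pv_equiv track=rewrite | github.com/vaibuzz/PolicyPilot | backend/modules/doc_extraction.py | _group_vocab_by_table
-- ===== SOURCE A (Python) =====
-- from typing import Any, Dict, List, Optional
--
-- _TABLE_KEYS = ("Invoice_table", "PO_table", "GRN_table", "Vendor_table")
--
-- def _group_vocab_by_table(vocab: List[str]) -> Dict[str, List[str]]:
--     """
--     Group a flat vocabulary list by table name.
--     e.g. ["Invoice_table.amount", "PO_table.qty"] →
--          {"Invoice_table": ["amount"], "PO_table": ["qty"]}
--     Strips the [*] array notation for display clarity.
--     """
--     grouped: Dict[str, List[str]] = {t: [] for t in _TABLE_KEYS}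
--     for path in vocab:
--         for table in _TABLE_KEYS:
--             if path.startswith(table + "."):
--                 field = path[len(table) + 1:]
--                 # Strip [*] suffix: "line_items[*].qty" → "line_items[*].qty" kept as-is
--                 # but simple paths like "amount" are added directly
--                 if field not in grouped[table]:
--                     grouped[table].append(field)
--                 break
--     return grouped
-- ===== SOURCE B (Python) =====
-- _TABLE_KEYS = ("Invoice_table", "PO_table", "GRN_table", "Vendor_table")
--
--
-- def _group_vocab_by_table(vocab):
--     # Phase 1: parse each path once (split at the first '.') and gather raw
--     # fields per table, duplicates included.
--     buckets = {t: [] for t in _TABLE_KEYS}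
--     for path in vocab:
--         table, dot, field = path.partition(".")
--         if dot and table in buckets:
--             buckets[table].append(field)
--     # Phase 2: dedup each bucket, keeping first-occurrence order.
--     return {t: list(dict.fromkeys(fields)) for t, fields in buckets.items()}
-- ===== Notes on version B (the rewrite author's own statement) =====
-- stated objective: faster
-- what changed: Replaces the inner prefix-scan over table keys with a single partition-at-first-dot plus dict membership, and splits the work into a gather pass (duplicates kept) followed by a separate dict.fromkeys dedup pass, removing A's per-item linear 'field not in bucket' scan.
import Mathlib
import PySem

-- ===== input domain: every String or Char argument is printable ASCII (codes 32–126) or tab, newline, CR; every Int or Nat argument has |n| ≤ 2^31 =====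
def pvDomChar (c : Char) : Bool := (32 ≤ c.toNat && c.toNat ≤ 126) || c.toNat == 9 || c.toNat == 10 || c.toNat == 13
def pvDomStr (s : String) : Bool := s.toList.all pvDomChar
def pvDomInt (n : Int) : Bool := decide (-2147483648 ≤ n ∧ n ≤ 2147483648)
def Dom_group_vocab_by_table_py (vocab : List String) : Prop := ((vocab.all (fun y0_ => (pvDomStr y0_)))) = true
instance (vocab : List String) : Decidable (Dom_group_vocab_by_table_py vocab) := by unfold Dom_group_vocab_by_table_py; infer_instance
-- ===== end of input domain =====

-- B replaces A's inner prefix-scan over the table keys with a single partition at the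
-- first '.' plus a dict-membership test, and defers dedup to a separate second pass
-- (gather raw fields with duplicates, then dict.fromkeys each bucket): an alternative decomposition.

-- ===== PORT A =====
def pvTableKeys : List String := ["Invoice_table", "PO_table", "GRN_table", "Vendor_table"]

-- inner `for table in _TABLE_KEYS: … break` of A
def pvAInner (path : String) (grouped : PySem.Dict String (List String)) :
    List String → PySem.Dict String (List String)
  | [] => grouped
  | t :: rest =>
    if PySem.Str.startswith path (t ++ ".") then
      let field := PySem.Str.slice path (some (PySem.Str.len t + 1)) none
      let cur := grouped.getD t []
      if cur.contains field then grouped else grouped.insert t (cur ++ [field])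
    else pvAInner path grouped rest

def group_vocab_by_table_py (vocab : List String) : List (String × List String) :=
  let grouped := pvTableKeys.foldl (fun d t => d.insert t ([] : List String)) PySem.Dict.empty
  (vocab.foldl (fun d path => pvAInner path d pvTableKeys) grouped).items

-- ===== PORT B =====
-- hand port of path.partition(".") (PySem has no partition); exact: scans to the
-- first '.', returns (before, found?, after)
def pvPartitionDot : List Char → List Char × Bool × List Char
  | [] => ([], false, [])
  | c :: rest =>
    if c = '.' then ([], true, rest)
    else
      let r := pvPartitionDot rest
      (c :: r.1, r.2.1, r.2.2)

-- B's loop body: gather the field, duplicates kept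
def pvBStep (d : PySem.Dict String (List String)) (path : String) :
    PySem.Dict String (List String) :=
  let r := pvPartitionDot path.toList
  let table := String.ofList r.1
  let field := String.ofList r.2.2
  if r.2.1 && d.contains table then d.insert table ((d.getD table []) ++ [field]) else d

def group_vocab_by_table_py_alt (vocab : List String) : List (String × List String) :=
  let buckets := pvTableKeys.foldl (fun d t => d.insert t ([] : List String)) PySem.Dict.empty
  let buckets := vocab.foldl pvBStep buckets
  buckets.items.map (fun p => (p.1, PySem.List.dedup p.2))

-- ===== PRECONDITION & SPEC =====
def Spec_group_vocab_by_table_py (vocab : List String) (out : List (String × List String)) : Prop := out = group_vocab_by_table_py_alt vocab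
instance (vocab : List String) (out : List (String × List String)) : Decidable (Spec_group_vocab_by_table_py vocab out) := by unfold Spec_group_vocab_by_table_py; infer_instance

-- ===== CLAIM (what is proved, stated in full; the proofs are below) =====
def Claim_equal_group_vocab_by_table_py : Prop := ∀ (vocab : List String), Dom_group_vocab_by_table_py vocab → Spec_group_vocab_by_table_py vocab (group_vocab_by_table_py vocab)

-- ===== LEMMAS AND PROOFS =====

-- value map relating A's (deduped-as-built) buckets to B's raw buckets
def pvG (p : String × List String) : String × List String := (p.1, PySem.List.dedup p.2)

theorem pvPartition_cons (c : Char) (rest : List Char) :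
    pvPartitionDot (c :: rest) =
      if c = '.' then ([], true, rest)
      else (c :: (pvPartitionDot rest).1, (pvPartitionDot rest).2.1, (pvPartitionDot rest).2.2) :=
  rfl

theorem pvPartition_of_split (a f : List Char) (h : '.' ∉ a) :
    pvPartitionDot (a ++ '.' :: f) = (a, true, f) := by
  induction a with
  | nil => simp [pvPartitionDot]
  | cons c rest ih =>
    simp only [List.mem_cons, not_or] at h
    rw [List.cons_append, pvPartition_cons, if_neg (Ne.symm h.1), ih h.2]

theorem pvPartition_true (s : List Char) (a : List Char) (f : List Char)
    (hr : pvPartitionDot s = (a, true, f)) : s = a ++ '.' :: f ∧ '.' ∉ a := by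
  induction s generalizing a with
  | nil => simp [pvPartitionDot] at hr
  | cons c rest ih =>
    rw [pvPartition_cons] at hr
    by_cases hc : c = '.'
    · rw [if_pos hc] at hr
      subst hc
      have h1 : ([] : List Char) = a := congrArg (fun q : List Char × Bool × List Char => q.1) hr
      have h3 : rest = f := congrArg (fun q : List Char × Bool × List Char => q.2.2) hr
      rw [← h1, ← h3]
      simp
    · rw [if_neg hc] at hr
      have h1 : c :: (pvPartitionDot rest).1 = a := congrArg (fun q : List Char × Bool × List Char => q.1) hr
      have h2 : (pvPartitionDot rest).2.1 = true := congrArg (fun q : List Char × Bool × List Char => q.2.1) hr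
      have h3 : (pvPartitionDot rest).2.2 = f := congrArg (fun q : List Char × Bool × List Char => q.2.2) hr
      obtain ⟨ih1, ih2⟩ := ih (pvPartitionDot rest).1 (by
        rw [← h3]
        exact Prod.ext rfl (Prod.ext h2 rfl))
      rw [← h1]
      refine ⟨?_, ?_⟩
      · rw [List.cons_append, ← ih1]
      · simp only [List.mem_cons, not_or]
        exact ⟨Ne.symm hc, ih2⟩

theorem pvNoDot : ∀ t ∈ pvTableKeys, '.' ∉ t.toList := by decide

theorem pvClass (path t : String) (ht : t ∈ pvTableKeys) :
    PySem.Str.startswith path (t ++ ".") = true ↔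
      ((pvPartitionDot path.toList).2.1 = true ∧
        String.ofList (pvPartitionDot path.toList).1 = t) := by
  have hchars : (t ++ ".").toList = t.toList ++ ['.'] := by
    simp [String.toList_append]
  rw [PySem.Str.startswith_eq, hchars, PySem.Chars.startswith_iff]
  constructor
  · rintro ⟨u, hu⟩
    have hp : path.toList = t.toList ++ '.' :: u := by simpa using hu.symm
    rw [hp, pvPartition_of_split _ _ (pvNoDot t ht)]
    simp
  · rintro ⟨h1, h2⟩
    rcases hr : pvPartitionDot path.toList with ⟨a, bf⟩
    rcases bf with ⟨b, f⟩
    rw [hr] at h1 h2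
    simp only at h1 h2
    subst h1
    obtain ⟨hs, -⟩ := pvPartition_true path.toList a f hr
    have htl : a = t.toList := by
      have := congrArg String.toList h2
      simpa using this
    exact ⟨f, by rw [hs, htl]; simp⟩

theorem pvField (path t : String) (ht : t ∈ pvTableKeys)
    (h : PySem.Str.startswith path (t ++ ".") = true) :
    PySem.Str.slice path (some (PySem.Str.len t + 1)) none
      = String.ofList (pvPartitionDot path.toList).2.2 := by
  obtain ⟨h1, h2⟩ := (pvClass path t ht).mp h
  rcases hr : pvPartitionDot path.toList with ⟨a, bf⟩
  rcases bf with ⟨b, f⟩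
  rw [hr] at h1 h2
  simp only at h1 h2
  subst h1
  obtain ⟨hs, -⟩ := pvPartition_true path.toList a f hr
  have htl : a = t.toList := by
    have := congrArg String.toList h2
    simpa using this
  subst htl
  apply String.toList_injective
  rw [PySem.Str.toList_slice, String.toList_ofList]
  have hlen : PySem.Str.len t + 1 = ((t.toList.length + 1 : Nat) : Int) := by
    simp [PySem.Str.len]
  rw [hlen]
  simp only [PySem.Chars.slice]
  rw [PySem.List.slice_from_natCast, hs]
  rw [List.drop_append]
  simp

theorem pvDedupSnoc (xs : List String) (x : String) :
    PySem.List.dedup (xs ++ [x]) =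
      if x ∈ xs then PySem.List.dedup xs else PySem.List.dedup xs ++ [x] := by
  rw [PySem.List.dedup_eq_ofList, PySem.Set.ofList_append, PySem.Set.update]
  simp only [List.foldl_cons, List.foldl_nil, PySem.Set.add]
  rw [← PySem.List.dedup_eq_ofList]
  by_cases hx : x ∈ xs
  · rw [if_pos (by simpa [List.contains_iff_mem, PySem.List.mem_dedup] using hx), if_pos hx]
  · rw [if_neg (by simpa [List.contains_iff_mem, PySem.List.mem_dedup] using hx), if_neg hx]

theorem pvGet?Map (l : List (String × List String)) (k : String) :
    (PySem.Dict.mk (l.map pvG) : PySem.Dict String (List String)).get? k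
      = ((PySem.Dict.mk l : PySem.Dict String (List String)).get? k).map PySem.List.dedup := by
  induction l with
  | nil => simp [PySem.Dict.get?]
  | cons p rest ih =>
    simp only [List.map_cons, pvG]
    rw [PySem.Dict.get?_mk_cons, PySem.Dict.get?_mk_cons]
    by_cases hk : p.1 == k
    · simp [hk]
    · simp [hk, ih]

theorem pvGetD (dA dB : PySem.Dict String (List String))
    (hrel : dA.items = dB.items.map pvG) (k : String) :
    dA.getD k [] = PySem.List.dedup (dB.getD k []) := by
  have hA : dA = PySem.Dict.mk (dB.items.map pvG) := PySem.Dict.ext hrel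
  have hB : dB = PySem.Dict.mk dB.items := PySem.Dict.ext rfl
  rw [hA, PySem.Dict.getD_eq_get?_getD, pvGet?Map, ← hB,
    PySem.Dict.getD_eq_get?_getD]
  cases dB.get? k <;> simp [PySem.List.dedup]

theorem pvKeysRel (dA dB : PySem.Dict String (List String))
    (hrel : dA.items = dB.items.map pvG) : dA.keys = dB.keys := by
  simp only [PySem.Dict.keys, hrel, List.map_map]
  rfl

theorem pvAInner_cons_false (path t : String) (d : PySem.Dict String (List String))
    (rest : List String) (h : PySem.Str.startswith path (t ++ ".") = false) :
    pvAInner path d (t :: rest) = pvAInner path d rest := by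
  simp only [pvAInner]
  rw [h]
  simp

theorem pvAInner_cons_true (path t : String) (d : PySem.Dict String (List String))
    (rest : List String) (h : PySem.Str.startswith path (t ++ ".") = true) :
    pvAInner path d (t :: rest) =
      (if (d.getD t []).contains (PySem.Str.slice path (some (PySem.Str.len t + 1)) none) then d
       else d.insert t (d.getD t [] ++ [PySem.Str.slice path (some (PySem.Str.len t + 1)) none])) := by
  simp only [pvAInner]
  rw [h]
  simp

theorem pvA_skip (path : String) (dA : PySem.Dict String (List String))
    (hswf : ∀ t, t ∈ pvTableKeys → PySem.Str.startswith path (t ++ ".") = false) :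
    pvAInner path dA pvTableKeys = dA := by
  show pvAInner path dA ["Invoice_table", "PO_table", "GRN_table", "Vendor_table"] = dA
  rw [pvAInner_cons_false path "Invoice_table" dA _ (hswf _ (by decide)),
    pvAInner_cons_false path "PO_table" dA _ (hswf _ (by decide)),
    pvAInner_cons_false path "GRN_table" dA _ (hswf _ (by decide)),
    pvAInner_cons_false path "Vendor_table" dA _ (hswf _ (by decide))]
  rfl

theorem pvStep (path : String) (dA dB : PySem.Dict String (List String))
    (hrel : dA.items = dB.items.map pvG) (hkB : dB.keys = pvTableKeys) :
    (pvAInner path dA pvTableKeys).items = (pvBStep dB path).items.map pvG := by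
  have hnodup : dB.keys.Nodup := by rw [hkB]; decide
  by_cases hb : (pvPartitionDot path.toList).2.1 = true
  · by_cases hT : String.ofList (pvPartitionDot path.toList).1 ∈ pvTableKeys
    · -- the path belongs to exactly one table T
      set T := String.ofList (pvPartitionDot path.toList).1 with hTdef
      set fB := String.ofList (pvPartitionDot path.toList).2.2 with hfBdef
      have hsw : PySem.Str.startswith path (T ++ ".") = true :=
        (pvClass path T hT).mpr ⟨hb, rfl⟩
      have hswne : ∀ t, t ∈ pvTableKeys → t ≠ T →
          PySem.Str.startswith path (t ++ ".") = false := by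
        intro t htm htne
        by_contra hcon
        have hc := (pvClass path t htm).mp
          (by revert hcon; cases PySem.Str.startswith path (t ++ ".") <;> simp)
        exact htne (by rw [← hc.2])
      have hcontB : dB.contains T = true :=
        (PySem.Dict.contains_iff_mem_keys dB T).mpr (hkB ▸ hT)
      have hcontA : dA.contains T = true := by
        rw [PySem.Dict.contains_iff_mem_keys, pvKeysRel dA dB hrel, hkB]; exact hT
      have hfield : PySem.Str.slice path (some (PySem.Str.len T + 1)) none = fB :=
        pvField path T hT hsw
      -- A's inner loop reduces to the single matching branch
      have hAred : pvAInner path dA pvTableKeys =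
          (if (dA.getD T []).contains fB then dA
           else dA.insert T (dA.getD T [] ++ [fB])) := by
        have key_cases : T = "Invoice_table" ∨ T = "PO_table" ∨ T = "GRN_table" ∨ T = "Vendor_table" := by
          simpa [pvTableKeys] using hT
        show pvAInner path dA ["Invoice_table", "PO_table", "GRN_table", "Vendor_table"] = _
        rcases key_cases with h | h | h | h
        · rw [← h, pvAInner_cons_true path T dA _ hsw, hfield]
        · rw [pvAInner_cons_false path "Invoice_table" dA _ (hswne _ (by decide) (by rw [h]; decide)),
            ← h, pvAInner_cons_true path T dA _ hsw, hfield]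
        · rw [pvAInner_cons_false path "Invoice_table" dA _ (hswne _ (by decide) (by rw [h]; decide)),
            pvAInner_cons_false path "PO_table" dA _ (hswne _ (by decide) (by rw [h]; decide)),
            ← h, pvAInner_cons_true path T dA _ hsw, hfield]
        · rw [pvAInner_cons_false path "Invoice_table" dA _ (hswne _ (by decide) (by rw [h]; decide)),
            pvAInner_cons_false path "PO_table" dA _ (hswne _ (by decide) (by rw [h]; decide)),
            pvAInner_cons_false path "GRN_table" dA _ (hswne _ (by decide) (by rw [h]; decide)),
            ← h, pvAInner_cons_true path T dA _ hsw, hfield]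
      have hBred : pvBStep dB path = dB.insert T (dB.getD T [] ++ [fB]) := by
        simp only [pvBStep, ← hTdef, ← hfBdef, hb, hcontB, Bool.and_self, if_pos]
      rw [hAred, hBred]
      have hAB : dA.getD T [] = PySem.List.dedup (dB.getD T []) := pvGetD dA dB hrel T
      rw [PySem.Dict.items_insert_of_contains dB _ hcontB]
      by_cases hmem : fB ∈ dB.getD T []
      · -- duplicate: A leaves its bucket alone; B appends, the final dedup eats it
        have hcA : (dA.getD T []).contains fB = true := by
          rw [hAB, List.contains_iff_mem, PySem.List.mem_dedup]; exact hmem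
        rw [if_pos hcA, hrel, List.map_map]
        apply List.map_congr_left
        intro p hp
        simp only [Function.comp_apply, beq_iff_eq]
        by_cases hpeq : p.1 = T
        · have hmemi : (T, p.2) ∈ dB.items := by rw [← hpeq]; exact hp
          have hpv : dB.getD T [] = p.2 :=
            PySem.Dict.getD_of_mem_items dB hmemi hnodup []
          rw [if_pos hpeq]
          simp only [pvG]
          rw [pvDedupSnoc, if_pos hmem, hpv, hpeq]
        · rw [if_neg hpeq]
      · -- new field: both append it
        have hcA : (dA.getD T []).contains fB = false := by
          rw [hAB]
          cases hc : (PySem.List.dedup (dB.getD T [])).contains fB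
          · rfl
          · exact absurd ((PySem.List.mem_dedup _ _).mp (List.contains_iff_mem.mp hc)) hmem
        rw [if_neg (by simp only [hcA]; simp), PySem.Dict.items_insert_of_contains dA _ hcontA,
          hrel, List.map_map, List.map_map]
        apply List.map_congr_left
        intro p hp
        simp only [Function.comp_apply, pvG, beq_iff_eq]
        by_cases hpeq : p.1 = T
        · simp only [if_pos hpeq]
          show (T, dA.getD T [] ++ [fB]) = (T, PySem.List.dedup (dB.getD T [] ++ [fB]))
          rw [pvDedupSnoc, if_neg hmem, hAB]
        · simp only [if_neg hpeq]
    · -- a dot was found but the prefix is not a table key: both skip the path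
      have hswf : ∀ t, t ∈ pvTableKeys → PySem.Str.startswith path (t ++ ".") = false := by
        intro t htm
        by_contra hcon
        have hc := (pvClass path t htm).mp
          (by revert hcon; cases PySem.Str.startswith path (t ++ ".") <;> simp)
        exact hT (by rw [hc.2]; exact htm)
      have hB : pvBStep dB path = dB := by
        simp only [pvBStep]
        have hcB : dB.contains (String.ofList (pvPartitionDot path.toList).1) = false := by
          cases hcb : dB.contains (String.ofList (pvPartitionDot path.toList).1)
          · rfl
          · exact absurd (hkB ▸ (PySem.Dict.contains_iff_mem_keys dB _).mp hcb) hT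
        rw [hcB]
        simp
      rw [pvA_skip path dA hswf, hB, hrel]
  · -- no dot in the path: both skip it
    have hswf : ∀ t, t ∈ pvTableKeys → PySem.Str.startswith path (t ++ ".") = false := by
      intro t htm
      by_contra hcon
      have hc := (pvClass path t htm).mp
        (by revert hcon; cases PySem.Str.startswith path (t ++ ".") <;> simp)
      exact hb hc.1
    have hB : pvBStep dB path = dB := by
      simp only [pvBStep]
      have hbf : (pvPartitionDot path.toList).2.1 = false := by
        cases hx : (pvPartitionDot path.toList).2.1
        · rfl
        · exact absurd hx hb
      rw [hbf]
      simp
    rw [pvA_skip path dA hswf, hB, hrel]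

theorem pvBkeys (d : PySem.Dict String (List String)) (path : String)
    (hk : d.keys = pvTableKeys) : (pvBStep d path).keys = pvTableKeys := by
  simp only [pvBStep]
  split
  · rename_i hcond
    rw [Bool.and_eq_true] at hcond
    rw [PySem.Dict.keys_insert_of_contains _ _ hcond.2, hk]
  · exact hk

theorem pvFold (vocab : List String) (dA dB : PySem.Dict String (List String))
    (hrel : dA.items = dB.items.map pvG) (hkB : dB.keys = pvTableKeys) :
    (vocab.foldl (fun d path => pvAInner path d pvTableKeys) dA).items
      = ((vocab.foldl pvBStep dB).items).map pvG := by
  induction vocab generalizing dA dB with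
  | nil => simpa using hrel
  | cons p rest ih =>
    simp only [List.foldl_cons]
    exact ih _ _ (pvStep p dA dB hrel hkB) (pvBkeys dB p hkB)

-- ===== VERDICT (by name: the statement is the Claim_ definition above) =====
theorem group_vocab_by_table_py_spec : Claim_equal_group_vocab_by_table_py := by
  intro vocab _
  unfold Spec_group_vocab_by_table_py group_vocab_by_table_py group_vocab_by_table_py_alt
  have hg : (fun p : String × List String => (p.1, PySem.List.dedup p.2)) = pvG := rfl
  rw [hg]
  exact pvFold vocab _ _ (by decide) (by decide)
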